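-- pv_equiv track=rewrite | github.com/petrovito/anki_terminal | collection_factories.py | _group_by_model_id
-- ===== SOURCE A (Python) =====
-- from typing import Dict, List, Set, Any
--
-- def _group_by_model_id(rows: List[Dict]) -> Dict[int, List[Dict]]:
--     """Group rows by their model ID (ntid)."""
--     grouped = {}
--     for row in rows:
--         model_id = row['ntid']
--         if model_id not in grouped:
--             grouped[model_id] = []
--         grouped[model_id].append(row)
--     return grouped
-- ===== SOURCE B (Python) =====
-- def _group_by_model_id(rows):
--     """Group rows by their model ID (ntid): dedup the ids in first-appearance
--     order, then build each group with an independent filter pass."""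
--     keys = list(dict.fromkeys(row['ntid'] for row in rows))
--     return {k: [row for row in rows if row['ntid'] == k] for k in keys}
-- ===== Notes on version B (the rewrite author's own statement) =====
-- stated objective: alternative
-- what changed: B first deduplicates the model ids in first-appearance order and then builds each group with an independent filter pass over the rows, instead of A's single pass that mutates a dict of accumulating lists.
import Mathlib
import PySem

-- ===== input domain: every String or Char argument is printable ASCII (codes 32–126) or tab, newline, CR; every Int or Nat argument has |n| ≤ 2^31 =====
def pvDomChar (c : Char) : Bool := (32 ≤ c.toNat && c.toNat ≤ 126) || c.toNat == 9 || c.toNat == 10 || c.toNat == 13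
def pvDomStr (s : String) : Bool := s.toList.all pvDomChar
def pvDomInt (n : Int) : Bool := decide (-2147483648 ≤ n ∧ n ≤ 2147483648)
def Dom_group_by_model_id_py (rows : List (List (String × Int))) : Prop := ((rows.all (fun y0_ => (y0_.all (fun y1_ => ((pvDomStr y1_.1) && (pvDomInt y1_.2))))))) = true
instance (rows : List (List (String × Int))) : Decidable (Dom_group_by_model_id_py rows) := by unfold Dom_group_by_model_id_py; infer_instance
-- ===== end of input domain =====

-- B replaces A's single mutating-dict pass by dedup-the-ids then one filter pass per id (alternative decomposition, same results).
-- A raises KeyError on rows lacking the 'ntid' key; Pre_ excludes exactly those inputs (B raises there too).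


-- row['ntid'] : first-match lookup in the row's association list (none = KeyError, excluded by Pre_)
def pvNtid? (row : List (String × Int)) : Option Int := (PySem.Dict.mk row).get? "ntid"

-- ===== PORT A =====
-- grouped = {}; for row: mid = row['ntid']; if mid not in grouped: grouped[mid] = []; grouped[mid].append(row); return grouped
def group_by_model_id_py (rows : List (List (String × Int))) : List (Int × List (List (String × Int))) :=
  (rows.foldl (fun grouped row =>
      match pvNtid? row with
      | none => grouped   -- KeyError: input excluded by Pre_
      | some mid =>
        let grouped := if grouped.contains mid then grouped else grouped.insert mid []
        grouped.modify mid [] (fun v => v ++ [row]))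
    PySem.Dict.empty).items

-- ===== PORT B =====
-- keys = list(dict.fromkeys(row['ntid'] for row in rows)); {k: [row for row in rows if row['ntid'] == k] for k in keys}
def group_by_model_id_py_alt (rows : List (List (String × Int))) : List (Int × List (List (String × Int))) :=
  let keys := PySem.List.dedup (rows.filterMap pvNtid?)
  keys.map (fun k => (k, rows.filter (fun row => pvNtid? row == some k)))

-- ===== PRECONDITION & SPEC =====
-- Pre_ excludes exactly the inputs where A raises KeyError: a row without the key "ntid".
def Pre_group_by_model_id_py (rows : List (List (String × Int))) : Prop :=
  ∀ row ∈ rows, (pvNtid? row).isSome = true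
instance (rows : List (List (String × Int))) : Decidable (Pre_group_by_model_id_py rows) := by unfold Pre_group_by_model_id_py; infer_instance
def pvWitness_group_by_model_id_py : (List (List (String × Int))) := [[("ntid", 1), ("id", 5)], [("ntid", 2)], [("ntid", 1)]]

def Spec_group_by_model_id_py (rows : List (List (String × Int))) (out : List (Int × List (List (String × Int)))) : Prop := out = group_by_model_id_py_alt rows
instance (rows : List (List (String × Int))) (out : List (Int × List (List (String × Int)))) : Decidable (Spec_group_by_model_id_py rows out) := by unfold Spec_group_by_model_id_py; infer_instance

-- ===== CLAIM (what is proved, stated in full; the proofs are below) =====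
def Claim_equal_group_by_model_id_py : Prop := ∀ (rows : List (List (String × Int))), Dom_group_by_model_id_py rows → Pre_group_by_model_id_py rows → Spec_group_by_model_id_py rows (group_by_model_id_py rows)

-- ===== LEMMAS AND PROOFS =====

-- the key of a row, total form (= the value at "ntid" when present)
def pvKey (row : List (String × Int)) : Int := (pvNtid? row).getD 0

-- A's guarded step ('if mid not in grouped: grouped[mid] = []' then append) is one Dict.modify
lemma pvStep_eq (g : PySem.Dict Int (List (List (String × Int)))) (mid : Int) (row : List (String × Int)) :
    (if g.contains mid then g else g.insert mid []).modify mid [] (fun v => v ++ [row])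
      = g.modify mid [] (fun v => v ++ [row]) := by
  by_cases h : g.contains mid
  · simp [h]
  · have h' : g.contains mid = false := by simpa using h
    have h0 : g.getD mid ([] : List (List (String × Int))) = [] :=
      PySem.Dict.getD_of_not_contains _ _ h'
    simp only [h', Bool.false_eq_true, if_false, PySem.Dict.modify,
      PySem.Dict.getD_insert_self, PySem.Dict.insert_insert_self, h0]

lemma pvFilterMap_eq_map (rows : List (List (String × Int)))
    (h : ∀ row ∈ rows, (pvNtid? row).isSome = true) :
    rows.filterMap pvNtid? = rows.map pvKey := by
  induction rows with
  | nil => rfl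
  | cons r rs ih =>
    have hr := h r (by simp)
    obtain ⟨v, hv⟩ := Option.isSome_iff_exists.mp hr
    simp [hv, pvKey, ih (fun x hx => h x (by simp [hx]))]

theorem group_by_model_id_py_spec : Claim_equal_group_by_model_id_py := by
  intro rows _ hpre
  unfold Spec_group_by_model_id_py group_by_model_id_py group_by_model_id_py_alt
  -- rewrite A's fold into the canonical modify-by-key fold
  have hfold : rows.foldl (fun grouped row =>
      match pvNtid? row with
      | none => grouped
      | some mid =>
        let grouped := if grouped.contains mid then grouped else grouped.insert mid []
        grouped.modify mid [] (fun v => v ++ [row])) PySem.Dict.empty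
      = rows.foldl (fun d row => d.modify (pvKey row) [] (fun v => v ++ [row])) PySem.Dict.empty := by
    apply PySem.List.foldl_congr_mem
    intro acc row hrow
    obtain ⟨v, hv⟩ := Option.isSome_iff_exists.mp (hpre row hrow)
    simp only [hv, pvKey, Option.getD_some]
    exact pvStep_eq acc v row
  rw [hfold]
  set d := rows.foldl (fun d row => d.modify (pvKey row) [] (fun v => v ++ [row])) PySem.Dict.empty with hd
  have hkeys : d.keys = PySem.List.dedup (rows.map pvKey) := by
    rw [hd, PySem.Dict.keys_foldl_modify_key rows pvKey [] (fun _ row => fun v => v ++ [row])]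
    simp [PySem.Dict.keys_empty, PySem.List.dedup_eq_ofList, PySem.Set.update, PySem.Set.ofList]
  have hnodup : d.keys.Nodup := by
    rw [hd]
    exact PySem.Dict.nodup_keys_foldl_modify_key rows pvKey [] (fun _ row => fun v => v ++ [row]) _ (by simp)
  have hgetD : ∀ k : Int, d.getD k [] = rows.filter (fun row => pvKey row == k) := by
    intro k
    have hmapfold : d = (rows.map (fun row => (pvKey row, row))).foldl
        (fun d p => d.modify p.1 [] (fun v => v ++ [p.2])) PySem.Dict.empty := by
      rw [hd, List.foldl_map]
    rw [hmapfold, PySem.Dict.getD_foldl_modify_append]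
    simp [List.filter_map, Function.comp_def, List.map_map]
  rw [PySem.Dict.items_eq_map_keys d hnodup [], hkeys,
      pvFilterMap_eq_map rows hpre]
  apply List.map_congr_left
  intro k _
  rw [hgetD k]
  congr 1
  apply List.filter_congr
  intro row hrow
  obtain ⟨v, hv⟩ := Option.isSome_iff_exists.mp (hpre row hrow)
  simp [hv, pvKey]
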